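-- pv_equiv track=rewrite | github.com/ctibedoJ/tsams-prime-generator | prime_generator/utils/tsams_utils.py | calculate_discriminant
-- ===== SOURCE A (Python) =====
-- def euler_phi(n: int) -> int:
--     """
--     Calculate Euler's totient function φ(n).
--
--     Args:
--         n: Positive integer
--
--     Returns:
--         Value of φ(n)
--     """
--     result = n  # Initialize result as n
--
--     # Consider all prime factors of n and subtract their multiples
--     p = 2
--     while p * p <= n:
--         # Check if p is a prime factor
--         if n % p == 0:
--             # If yes, then update n and result
--             while n % p == 0:
--                 n //= p
--             result -= result // p
--         p += 1
--
--     # If n has a prime factor greater than sqrt(n)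
--     # (There can be at most one such prime factor)
--     if n > 1:
--         result -= result // n
--
--     return result
--
-- def calculate_discriminant(conductor: int) -> int:
--     """
--     Calculate the discriminant of the cyclotomic field Q(ζ_n).
--
--     Args:
--         conductor: Conductor of the cyclotomic field
--
--     Returns:
--         Discriminant of the field
--     """
--     n = conductor
--     phi_n = euler_phi(conductor)
--
--     # For Q(ζ_n), the discriminant formula depends on n
--     if n == 1:
--         return 1
--     elif n == 2:
--         return -1
--     elif n >= 3:
--         # Calculate the discriminant using the formula
--         # For a prime power p^a, disc = ±p^(φ(p^a)*(p^a-1-φ(p^a))/φ(p^a))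
--         # For general n, multiply the contributions from each prime power
--
--         # Factor n into prime powers
--         factors = {}
--         temp = n
--         p = 2
--         while p * p <= temp:
--             if temp % p == 0:
--                 count = 0
--                 while temp % p == 0:
--                     temp //= p
--                     count += 1
--                 factors[p] = count
--             p += 1
--
--         if temp > 1:
--             factors[temp] = 1
--
--         # Calculate the discriminant
--         disc = 1
--         for p, a in factors.items():
--             p_power = p**a
--             phi_p_power = euler_phi(p_power)
--
--             # Calculate the exponent
--             if p == 2 and a >= 2:
--                 # Special case for p=2, a>=2
--                 exponent = phi_p_power * (p_power // 2 - 1) // 2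
--             else:
--                 exponent = phi_p_power * (p_power - 1 - phi_p_power) // 2
--
--             # Multiply by p^exponent
--             disc *= p**exponent
--
--         # Determine the sign
--         if n == 4:
--             return disc  # Positive for n=4
--         elif (n % 4 == 0) and ((n // 4) % 2 == 1):
--             return -disc  # Negative in certain cases
--         else:
--             return disc  # Positive otherwise
--
--     return 0  # Should not reach here
-- ===== SOURCE B (Python) =====
-- def _contrib(p, a):
--     """Discriminant factor contributed by the prime power p**a (phi in closed form)."""
--     p_power = p ** a
--     phi = p ** (a - 1) * (p - 1)
--     if p == 2 and a >= 2:
--         exponent = phi * (p_power // 2 - 1) // 2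
--     else:
--         exponent = phi * (p_power - 1 - phi) // 2
--     return p ** exponent
--
--
-- def calculate_discriminant(conductor: int) -> int:
--     n = conductor
--     if n == 1:
--         return 1
--     if n == 2:
--         return -1
--     if n < 3:
--         return 0
--     # single fused pass: factor n and accumulate the discriminant as we go
--     disc = 1
--     temp = n
--     p = 2
--     while p * p <= temp:
--         if temp % p == 0:
--             a = 0
--             while temp % p == 0:
--                 temp //= p
--                 a += 1
--             disc *= _contrib(p, a)
--         p += 1
--     if temp > 1:
--         disc *= _contrib(temp, 1)
--     if n % 4 == 0 and n != 4 and (n // 4) % 2 == 1: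
--         return -disc
--     return disc
-- ===== Notes on version B (the rewrite author's own statement) =====
-- stated objective: simpler
-- what changed: B fuses A's two phases (build a dict of prime multiplicities, then loop over it calling trial-division euler_phi on each prime power) into one trial-division pass that multiplies the discriminant as it factors, computing each totient in closed form p**(a-1)*(p-1) and dropping euler_phi and the unused phi_n entirely.
import Mathlib
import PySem

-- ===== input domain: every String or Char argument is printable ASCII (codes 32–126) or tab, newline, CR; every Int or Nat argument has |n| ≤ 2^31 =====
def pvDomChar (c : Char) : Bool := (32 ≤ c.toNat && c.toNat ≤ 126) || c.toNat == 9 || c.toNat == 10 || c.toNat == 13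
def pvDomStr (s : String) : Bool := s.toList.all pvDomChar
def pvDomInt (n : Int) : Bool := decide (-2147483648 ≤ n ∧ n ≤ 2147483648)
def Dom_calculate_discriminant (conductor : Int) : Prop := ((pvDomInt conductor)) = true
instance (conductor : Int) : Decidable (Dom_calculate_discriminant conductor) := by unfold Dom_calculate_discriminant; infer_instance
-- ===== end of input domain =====

-- B replaces A's dict-building factorisation pass + per-prime-power euler_phi trial divisions by one
-- fused trial-division loop that multiplies the discriminant together as it factors, computing the
-- totient of each prime power in closed form p^(a-1)*(p-1); objective: simpler.

-- ===== PORT A =====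

-- arithmetic facts the termination measures of the loops below cite by name
theorem pvEdivLt (n p : Int) (hn : 0 < n) (hp : 1 < p) : n / p < n := by
  have h1 := Int.mul_ediv_add_emod n p
  have h2 := Int.emod_nonneg n (by omega : p ≠ 0)
  have h3 : 0 ≤ n / p := Int.ediv_nonneg (by omega) (by omega)
  nlinarith

theorem pvEdivPos (n p : Int) (hn : 0 < n) (hp : 0 < p) (h : p ∣ n) : 0 < n / p := by
  obtain ⟨k, rfl⟩ := h
  rw [Int.mul_ediv_cancel_left _ (by omega : p ≠ 0)]
  nlinarith

theorem pvTermDiv (p n : Int) (hm : PySem.Int.mod n p = 0) (hn : 0 < n) (hp : 2 ≤ p) :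
    (PySem.Int.floordiv n p).toNat < n.toNat := by
  rw [PySem.Int.floordiv_eq_ediv_of_pos (by omega)]
  have h1 := pvEdivLt n p hn (by omega)
  have h2 : 0 ≤ n / p := Int.ediv_nonneg (by omega) (by omega)
  omega

theorem pvTermStep (t p x : Int) (hp : 2 ≤ p) (hpt : p * p ≤ t) (hle : x ≤ t) :
    (x - (p + 1)).toNat < (t - p).toNat := by
  have h1 : 2 * p ≤ p * p := by nlinarith
  omega

-- inner `while n % p == 0: n //= p` of euler_phi (the `0 < n ∧ 2 ≤ p` conjuncts are totality
-- guards only: they hold whenever the Python loop runs)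
def pvDivAll (p n : Int) : Int :=
  if h : PySem.Int.mod n p = 0 ∧ 0 < n ∧ 2 ≤ p then pvDivAll p (PySem.Int.floordiv n p) else n
termination_by n.toNat
decreasing_by exact pvTermDiv p n h.1 h.2.1 h.2.2

theorem pvDivAll_le (p n : Int) : pvDivAll p n ≤ n := by
  fun_induction pvDivAll p n with
  | case1 n h ih =>
    obtain ⟨hm, hn', hp⟩ := h
    have hdvd : p ∣ n := (PySem.Int.mod_eq_zero_iff_dvd n p).mp hm
    have hpos : 0 < PySem.Int.floordiv n p := by
      rw [PySem.Int.floordiv_eq_ediv_of_pos (by omega)]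
      exact pvEdivPos n p hn' (by omega) hdvd
    have hle : PySem.Int.floordiv n p ≤ n := by
      rw [PySem.Int.floordiv_eq_ediv_of_pos (by omega)]
      exact le_of_lt (pvEdivLt n p hn' (by omega))
    exact le_trans ih hle
  | case2 n h => exact le_rfl

-- `while p * p <= n:` loop of euler_phi (`2 ≤ p` is a totality guard: p starts at 2 and only grows)
def pvPhiLoop (n result p : Int) : Int :=
  if h : 2 ≤ p ∧ p * p ≤ n then
    if PySem.Int.mod n p = 0 then
      pvPhiLoop (pvDivAll p n) (result - PySem.Int.floordiv result p) (p + 1)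
    else pvPhiLoop n result (p + 1)
  else if 1 < n then result - PySem.Int.floordiv result n else result
termination_by (n - p).toNat
decreasing_by
  · exact pvTermStep n p (pvDivAll p n) h.1 h.2 (pvDivAll_le p n)
  · exact pvTermStep n p n h.1 h.2 le_rfl

def euler_phi (n : Int) : Int := pvPhiLoop n n 2

-- inner `while temp % p == 0: temp //= p; count += 1` of A's factor loop (same totality guards)
def pvDivOut (p temp count : Int) : Int × Int :=
  if h : PySem.Int.mod temp p = 0 ∧ 0 < temp ∧ 2 ≤ p then
    pvDivOut p (PySem.Int.floordiv temp p) (count + 1)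
  else (count, temp)
termination_by temp.toNat
decreasing_by exact pvTermDiv p temp h.1 h.2.1 h.2.2

theorem pvDivOut_snd_le (p temp c : Int) : (pvDivOut p temp c).2 ≤ temp := by
  fun_induction pvDivOut p temp c with
  | case1 temp c h ih =>
    obtain ⟨hm, hn', hp⟩ := h
    have hdvd : p ∣ temp := (PySem.Int.mod_eq_zero_iff_dvd temp p).mp hm
    have hpos : 0 < PySem.Int.floordiv temp p := by
      rw [PySem.Int.floordiv_eq_ediv_of_pos (by omega)]
      exact pvEdivPos temp p hn' (by omega) hdvd
    have hle : PySem.Int.floordiv temp p ≤ temp := by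
      rw [PySem.Int.floordiv_eq_ediv_of_pos (by omega)]
      exact le_of_lt (pvEdivLt temp p hn' (by omega))
    exact le_trans ih hle
  | case2 temp c h => exact le_rfl

-- A's factor loop: builds the dict of prime multiplicities as an ordered association list
-- (keys are found in increasing order, so insertion order = list order) plus the leftover temp
def pvFactorLoop (temp p : Int) : List (Int × Int) × Int :=
  if h : 2 ≤ p ∧ p * p ≤ temp then
    if PySem.Int.mod temp p = 0 then
      let r := pvDivOut p temp 0
      let rest := pvFactorLoop r.2 (p + 1)
      ((p, r.1) :: rest.1, rest.2)
    else pvFactorLoop temp (p + 1)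
  else ([], temp)
termination_by (temp - p).toNat
decreasing_by
  · exact pvTermStep temp p _ h.1 h.2 (pvDivOut_snd_le p temp 0)
  · exact pvTermStep temp p temp h.1 h.2 le_rfl

-- A's loop body for one (p, a) pair: p ** exponent (the exponent is nonnegative wherever A
-- reaches this code, so `^ ·.toNat` is exact there)
def pvContribA (p a : Int) : Int :=
  let p_power := p ^ a.toNat
  let phi := euler_phi p_power
  let exponent :=
    if p = 2 ∧ 2 ≤ a then PySem.Int.floordiv (phi * (PySem.Int.floordiv p_power 2 - 1)) 2
    else PySem.Int.floordiv (phi * (p_power - 1 - phi)) 2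
  p ^ exponent.toNat

def calculate_discriminant (conductor : Int) : Int :=
  let n := conductor
  let _phi_n := euler_phi conductor
  if n = 1 then 1
  else if n = 2 then -1
  else if 3 ≤ n then
    let fr := pvFactorLoop n 2
    let factors := if 1 < fr.2 then fr.1 ++ [(fr.2, 1)] else fr.1
    let disc := factors.foldl (fun d pa => d * pvContribA pa.1 pa.2) 1
    if n = 4 then disc
    else if PySem.Int.mod n 4 = 0 ∧ PySem.Int.mod (PySem.Int.floordiv n 4) 2 = 1 then -disc
    else disc
  else 0

-- ===== PORT B =====

-- B's _contrib: the totient of p**a in closed form, no euler_phi (same `^ ·.toNat` remark)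
def pvContribB (p a : Int) : Int :=
  let p_power := p ^ a.toNat
  let phi := p ^ (a - 1).toNat * (p - 1)
  let exponent :=
    if p = 2 ∧ 2 ≤ a then PySem.Int.floordiv (phi * (PySem.Int.floordiv p_power 2 - 1)) 2
    else PySem.Int.floordiv (phi * (p_power - 1 - phi)) 2
  p ^ exponent.toNat

-- B's fused loop: factor and accumulate disc in one pass; returns (disc, temp)
def pvBLoop (temp p disc : Int) : Int × Int :=
  if h : 2 ≤ p ∧ p * p ≤ temp then
    if PySem.Int.mod temp p = 0 then
      let r := pvDivOut p temp 0
      pvBLoop r.2 (p + 1) (disc * pvContribB p r.1)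
    else pvBLoop temp (p + 1) disc
  else (disc, temp)
termination_by (temp - p).toNat
decreasing_by
  · exact pvTermStep temp p _ h.1 h.2 (pvDivOut_snd_le p temp 0)
  · exact pvTermStep temp p temp h.1 h.2 le_rfl

def calculate_discriminant_alt (conductor : Int) : Int :=
  let n := conductor
  if n = 1 then 1
  else if n = 2 then -1
  else if n < 3 then 0
  else
    let r := pvBLoop n 2 1
    let disc := if 1 < r.2 then r.1 * pvContribB r.2 1 else r.1
    if PySem.Int.mod n 4 = 0 ∧ n ≠ 4 ∧ PySem.Int.mod (PySem.Int.floordiv n 4) 2 = 1 then -disc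
    else disc

-- ===== PRECONDITION & SPEC =====
def Spec_calculate_discriminant (conductor : Int) (out : Int) : Prop := out = calculate_discriminant_alt conductor
instance (conductor : Int) (out : Int) : Decidable (Spec_calculate_discriminant conductor out) := by unfold Spec_calculate_discriminant; infer_instance

-- ===== CLAIM (what is proved, stated in full; the proofs are below) =====
def Claim_equal_calculate_discriminant : Prop := ∀ (conductor : Int), Dom_calculate_discriminant conductor → Spec_calculate_discriminant conductor (calculate_discriminant conductor)

-- ===== LEMMAS AND PROOFS =====

theorem pvDivOut_spec (p temp c : Int) (ht : 0 < temp) (hp : 2 ≤ p) :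
    ∃ k : Nat, (pvDivOut p temp c).1 = c + k ∧ temp = p ^ k * (pvDivOut p temp c).2 ∧
      ¬ (p ∣ (pvDivOut p temp c).2) ∧ 0 < (pvDivOut p temp c).2 ∧
      (PySem.Int.mod temp p = 0 → 1 ≤ k) := by
  fun_induction pvDivOut p temp c with
  | case1 temp c h ih =>
    obtain ⟨hm, hn', hp'⟩ := h
    have hdvd : p ∣ temp := (PySem.Int.mod_eq_zero_iff_dvd temp p).mp hm
    have hfd : PySem.Int.floordiv temp p = temp / p :=
      PySem.Int.floordiv_eq_ediv_of_pos (by omega)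
    have hpos : 0 < PySem.Int.floordiv temp p := by
      rw [hfd]; exact pvEdivPos temp p hn' (by omega) hdvd
    obtain ⟨k, h1, h2, h3, h4, _⟩ := ih hpos
    refine ⟨k + 1, by push_cast; omega, ?_, h3, h4, by omega⟩
    have : temp = p * PySem.Int.floordiv temp p := by
      rw [hfd]; exact (Int.ediv_mul_cancel hdvd).symm ▸ (Int.mul_ediv_cancel' hdvd).symm
    calc temp = p * PySem.Int.floordiv temp p := this
    _ = p * (p ^ k * (pvDivOut p (PySem.Int.floordiv temp p) (c + 1)).2) := by rw [← h2]
    _ = p ^ (k + 1) * (pvDivOut p (PySem.Int.floordiv temp p) (c + 1)).2 := by ring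
  | case2 temp c h =>
    refine ⟨0, by omega, by simp, ?_, ht, ?_⟩
    · intro hdvd
      exact h ⟨(PySem.Int.mod_eq_zero_iff_dvd temp p).mpr hdvd, ht, hp⟩
    · intro hm; exact absurd ⟨hm, ht, hp⟩ h

theorem pvPhiLoop_walk_aux (N r b : Int) (k : Nat) :
    ∀ a, 2 ≤ a → a ≤ b → (b - a).toNat ≤ k →
      (∀ m, a ≤ m → m < b → PySem.Int.mod N m ≠ 0) →
      pvPhiLoop N r a = pvPhiLoop N r b := by
  induction k with
  | zero =>
    intro a ha hab hk _
    have hab' : a = b := by omega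
    exact hab' ▸ rfl
  | succ k ih =>
    intro a ha hab hk H
    rcases eq_or_lt_of_le hab with rfl | hlt
    · rfl
    · by_cases hc : 2 ≤ a ∧ a * a ≤ N
      · have hm : PySem.Int.mod N a ≠ 0 := H a le_rfl hlt
        conv_lhs => rw [pvPhiLoop]
        simp only [hc, hm, if_neg, not_false_iff]
        exact ih (a + 1) (by omega) (by omega) (by omega)
          (fun m hm1 hm2 => H m (by omega) hm2)
      · have haN : N < a * a := by
          rcases not_and_or.mp hc with h | h
          · omega
          · omega
        have hbN : N < b * b := by nlinarith
        conv_lhs => rw [pvPhiLoop]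
        conv_rhs => rw [pvPhiLoop]
        have hc' : ¬ (2 ≤ b ∧ b * b ≤ N) := by omega
        simp only [hc, dif_neg, not_false_iff, hc']

theorem pvPhiLoop_walk (N r a b : Int) (ha : 2 ≤ a) (hab : a ≤ b)
    (H : ∀ m, a ≤ m → m < b → PySem.Int.mod N m ≠ 0) :
    pvPhiLoop N r a = pvPhiLoop N r b :=
  pvPhiLoop_walk_aux N r b (b - a).toNat a ha hab le_rfl H

theorem pvDivAll_pow (p : Int) (hp : 2 ≤ p) (k : Nat) : pvDivAll p (p ^ k) = 1 := by
  induction k with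
  | zero =>
    rw [pvDivAll]
    have h1 : PySem.Int.mod 1 p = 1 % p := PySem.Int.mod_eq_emod_of_pos (by omega)
    have h2 : (1 : Int) % p = 1 := Int.emod_eq_of_lt (by omega) (by omega)
    simp only [pow_zero]
    rw [dif_neg]; omega
  | succ k ih =>
    rw [pvDivAll]
    have hdvd : p ∣ p ^ (k + 1) := dvd_pow_self p (Nat.succ_ne_zero k)
    have hm : PySem.Int.mod (p ^ (k + 1)) p = 0 := (PySem.Int.mod_eq_zero_iff_dvd _ p).mpr hdvd
    have hpos : (0 : Int) < p ^ (k + 1) := pow_pos (by omega) _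
    rw [dif_pos ⟨hm, hpos, hp⟩]
    have : PySem.Int.floordiv (p ^ (k + 1)) p = p ^ k := by
      rw [PySem.Int.floordiv_eq_ediv_of_pos (by omega), pow_succ]
      exact Int.mul_ediv_cancel _ (by omega)
    rw [this]; exact ih

theorem euler_phi_pp (p : Int) (c : Nat) (hp : 2 ≤ p) (hc : 1 ≤ c)
    (H : ∀ m, 2 ≤ m → m < p → ¬ (m ∣ p ^ c)) :
    euler_phi (p ^ c) = p ^ (c - 1) * (p - 1) := by
  have hppos : (0 : Int) < p ^ c := pow_pos (by omega) _
  have hself : (1 : Int) < p ^ c := by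
    calc (1 : Int) < p := by omega
    _ = p ^ 1 := (pow_one p).symm
    _ ≤ p ^ c := pow_le_pow_right₀ (by omega) hc
  have hwalk : pvPhiLoop (p ^ c) (p ^ c) 2 = pvPhiLoop (p ^ c) (p ^ c) p := by
    apply pvPhiLoop_walk _ _ _ _ (by omega) (by omega)
    intro m hm1 hm2 hmod
    exact H m hm1 hm2 ((PySem.Int.mod_eq_zero_iff_dvd _ m).mp hmod)
  rw [euler_phi, hwalk]
  rcases Nat.lt_or_ge c 2 with hc1 | hc2
  · -- c = 1
    have hc1' : c = 1 := by omega
    subst hc1'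
    rw [pvPhiLoop]
    have hcond : ¬ (2 ≤ p ∧ p * p ≤ p ^ 1) := by
      rw [pow_one]; intro ⟨h1, h2⟩; nlinarith
    rw [dif_neg hcond, if_pos hself]
    have : PySem.Int.floordiv (p ^ 1) (p ^ 1) = 1 := by
      rw [PySem.Int.floordiv_eq_ediv_of_pos (by positivity)]
      exact Int.ediv_self (by positivity)
    rw [this]; simp
  · -- c ≥ 2
    rw [pvPhiLoop]
    have hcond : 2 ≤ p ∧ p * p ≤ p ^ c := by
      refine ⟨hp, ?_⟩
      calc p * p = p ^ 2 := by ring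
      _ ≤ p ^ c := pow_le_pow_right₀ (by omega) hc2
    have hm : PySem.Int.mod (p ^ c) p = 0 :=
      (PySem.Int.mod_eq_zero_iff_dvd _ p).mpr (dvd_pow_self p (by omega))
    rw [dif_pos hcond, if_pos hm, pvDivAll_pow p hp c]
    have hfd : PySem.Int.floordiv (p ^ c) p = p ^ (c - 1) := by
      rw [PySem.Int.floordiv_eq_ediv_of_pos (by omega)]
      have : p ^ c = p ^ (c - 1) * p := by
        rw [← pow_succ]; congr 1; omega
      rw [this]; exact Int.mul_ediv_cancel _ (by omega)
    rw [hfd, pvPhiLoop]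
    have hcond2 : ¬ (2 ≤ p + 1 ∧ (p + 1) * (p + 1) ≤ 1) := by
      intro ⟨h1, h2⟩; nlinarith
    rw [dif_neg hcond2, if_neg (by omega)]
    have hpc : p ^ c = p ^ (c - 1) * p := by rw [← pow_succ]; congr 1; omega
    rw [hpc]; ring

theorem euler_phi_no_small_divisor (t q : Int) (h2 : 2 ≤ t) (hq : 2 ≤ q) (hlt : t < q * q)
    (H : ∀ m, 2 ≤ m → m < q → ¬ (m ∣ t)) : euler_phi t = t - 1 := by
  have hwalk : pvPhiLoop t t 2 = pvPhiLoop t t q := by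
    apply pvPhiLoop_walk _ _ _ _ (by omega) (by omega)
    intro m hm1 hm2 hmod
    exact H m hm1 hm2 ((PySem.Int.mod_eq_zero_iff_dvd _ m).mp hmod)
  rw [euler_phi, hwalk, pvPhiLoop]
  rw [dif_neg (by omega : ¬ (2 ≤ q ∧ q * q ≤ t)), if_pos (by omega : (1 : Int) < t)]
  have : PySem.Int.floordiv t t = 1 := by
    rw [PySem.Int.floordiv_eq_ediv_of_pos (by omega)]
    exact Int.ediv_self (by omega)
  rw [this]

theorem contrib_eq (p a : Int) (hp : 2 ≤ p) (ha : 1 ≤ a)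
    (H : ∀ m, 2 ≤ m → m < p → ¬ (m ∣ p ^ a.toNat)) : pvContribA p a = pvContribB p a := by
  simp only [pvContribA, pvContribB]
  rw [euler_phi_pp p a.toNat hp (by omega) H]
  have : (a - 1).toNat = a.toNat - 1 := by omega
  rw [this]

theorem contrib_eq_leftover (t q : Int) (h2 : 2 ≤ t) (hq : 2 ≤ q) (hlt : t < q * q)
    (H : ∀ m, 2 ≤ m → m < q → ¬ (m ∣ t)) : pvContribA t 1 = pvContribB t 1 := by
  simp only [pvContribA, pvContribB]
  have h1 : (1 : Int).toNat = 1 := rfl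
  have h0 : ((1 : Int) - 1).toNat = 0 := rfl
  rw [h1, h0, pow_one, pow_zero, one_mul,
    euler_phi_no_small_divisor t q h2 hq hlt H]

theorem pvBLoop_eq (temp p d : Int) :
    pvBLoop temp p d =
      ((pvFactorLoop temp p).1.foldl (fun acc pa => acc * pvContribB pa.1 pa.2) d,
       (pvFactorLoop temp p).2) := by
  fun_induction pvBLoop temp p d with
  | case1 temp p d h hm r ih =>
    have hr : r = pvDivOut p temp 0 := rfl
    conv_rhs => rw [pvFactorLoop]
    simp only [h, hm, if_pos, List.foldl_cons]
    rw [hr] at ih ⊢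
    exact ih
  | case2 temp p d h hm ih =>
    conv_rhs => rw [pvFactorLoop]
    simp only [h, hm, if_neg, not_false_iff]
    exact ih
  | case3 temp p d h =>
    conv_rhs => rw [pvFactorLoop]
    simp only [h, dif_neg, not_false_iff, List.foldl_nil]

theorem pvFactorLoop_inv (temp p : Int) (ht : 0 < temp) (hp : 2 ≤ p)
    (hinv : ∀ m, 2 ≤ m → m < p → ¬ (m ∣ temp)) :
    (∀ pa ∈ (pvFactorLoop temp p).1,
        2 ≤ pa.1 ∧ 1 ≤ pa.2 ∧ ∀ m, 2 ≤ m → m < pa.1 → ¬ (m ∣ pa.1 ^ pa.2.toNat)) ∧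
    ∃ q, 2 ≤ q ∧ (pvFactorLoop temp p).2 < q * q ∧ 0 < (pvFactorLoop temp p).2 ∧
      ∀ m, 2 ≤ m → m < q → ¬ (m ∣ (pvFactorLoop temp p).2) := by
  fun_induction pvFactorLoop temp p with
  | case1 temp p h hm r rest ih =>
    obtain ⟨hp', hpt⟩ := h
    have hr : r = pvDivOut p temp 0 := rfl
    have hrest : rest = pvFactorLoop r.2 (p + 1) := rfl
    simp only [hr] at hrest ih ⊢
    obtain ⟨k, hk1, hk2, hk3, hk4, hk5⟩ := pvDivOut_spec p temp 0 ht hp'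
    have hk1' : 1 ≤ k := hk5 hm
    have hsnd_dvd : (pvDivOut p temp 0).2 ∣ temp := Dvd.intro_left _ hk2.symm
    have hinv' : ∀ m, 2 ≤ m → m < p + 1 → ¬ (m ∣ (pvDivOut p temp 0).2) := by
      intro m hm1 hm2 hmd
      rcases eq_or_lt_of_le (by omega : m ≤ p) with rfl | hmp
      · exact hk3 hmd
      · exact hinv m hm1 hmp (hmd.trans hsnd_dvd)
    obtain ⟨ihel, q, hq1, hq2, hq3, hq4⟩ := ih hk4 (by omega) hinv'
    constructor
    · intro pa hpa
      rcases List.mem_cons.mp hpa with rfl | hmem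
      · refine ⟨hp', by simp; omega, ?_⟩
        intro m hm1 hm2 hmd
        have hfst : (pvDivOut p temp 0).1.toNat = k := by omega
        have hpk_dvd : p ^ k ∣ temp := Dvd.intro _ hk2.symm
        rw [hfst] at hmd
        exact hinv m hm1 hm2 (dvd_trans hmd hpk_dvd)
      · exact ihel pa hmem
    · exact ⟨q, hq1, hq2, hq3, hq4⟩
  | case2 temp p h hm ih =>
    obtain ⟨hp', hpt⟩ := h
    have hinv' : ∀ m, 2 ≤ m → m < p + 1 → ¬ (m ∣ temp) := by
      intro m hm1 hm2 hmd
      rcases eq_or_lt_of_le (by omega : m ≤ p) with rfl | hmp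
      · exact hm ((PySem.Int.mod_eq_zero_iff_dvd temp m).mpr hmd)
      · exact hinv m hm1 hmp hmd
    exact ih ht (by omega) hinv'
  | case3 temp p h =>
    refine ⟨by simp, p, hp, by omega, ht, hinv⟩

theorem foldl_contrib_congr (l : List (Int × Int))
    (h : ∀ pa ∈ l, pvContribA pa.1 pa.2 = pvContribB pa.1 pa.2) :
    ∀ d : Int,
      l.foldl (fun acc pa => acc * pvContribA pa.1 pa.2) d =
      l.foldl (fun acc pa => acc * pvContribB pa.1 pa.2) d := by
  induction l with
  | nil => intro d; rfl
  | cons x xs ih =>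
    intro d
    simp only [List.foldl_cons]
    rw [h x List.mem_cons_self, ih (fun pa hpa => h pa (List.mem_cons_of_mem x hpa))]

theorem main_eq (n : Int) : calculate_discriminant n = calculate_discriminant_alt n := by
  by_cases h1 : n = 1
  · subst h1; rfl
  by_cases h2 : n = 2
  · subst h2; rfl
  by_cases h3 : 3 ≤ n
  · have hlt3 : ¬ n < 3 := by omega
    simp only [calculate_discriminant, calculate_discriminant_alt, h1, h2, h3, hlt3,
      if_pos, if_neg, not_false_iff]
    obtain ⟨hel, q, hq1, hq2, hq3, hq4⟩ :=
      pvFactorLoop_inv n 2 (by omega) (by omega) (by intro m hm1 hm2; omega)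
    rw [pvBLoop_eq]
    have hfold : (pvFactorLoop n 2).1.foldl (fun acc pa => acc * pvContribA pa.1 pa.2) 1 =
        (pvFactorLoop n 2).1.foldl (fun acc pa => acc * pvContribB pa.1 pa.2) 1 := by
      apply foldl_contrib_congr
      intro pa hpa
      obtain ⟨e1, e2, e3⟩ := hel pa hpa
      exact contrib_eq pa.1 pa.2 e1 e2 e3
    have hdisc : (if 1 < (pvFactorLoop n 2).2 then
          (pvFactorLoop n 2).1 ++ [((pvFactorLoop n 2).2, 1)] else (pvFactorLoop n 2).1).foldl
          (fun acc pa => acc * pvContribA pa.1 pa.2) 1 =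
        (if 1 < (pvFactorLoop n 2).2 then
          ((pvFactorLoop n 2).1.foldl (fun acc pa => acc * pvContribB pa.1 pa.2) 1) *
            pvContribB (pvFactorLoop n 2).2 1
        else (pvFactorLoop n 2).1.foldl (fun acc pa => acc * pvContribB pa.1 pa.2) 1) := by
      by_cases hl : 1 < (pvFactorLoop n 2).2
      · rw [if_pos hl, if_pos hl, List.foldl_append, hfold]
        simp only [List.foldl_cons, List.foldl_nil]
        rw [contrib_eq_leftover (pvFactorLoop n 2).2 q (by omega) hq1 hq2 hq4]
      · rw [if_neg hl, if_neg hl, hfold]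
    rw [hdisc]
    by_cases h4 : n = 4
    · subst h4
      simp [PySem.Int.mod, PySem.Int.floordiv]
    · simp only [h4, if_neg, not_false_iff, ne_eq, true_and]
  · have hlt3 : n < 3 := by omega
    simp only [calculate_discriminant, calculate_discriminant_alt, h1, h2, h3, hlt3,
      if_true, if_neg, not_false_iff]

-- ===== VERDICT (by name: the statement is the Claim_ definition above) =====
theorem calculate_discriminant_spec : Claim_equal_calculate_discriminant := by
  intro n _
  exact main_eq n
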